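-- pv_equiv track=rewrite | github.com/svillav/PDI_TUIA_2026 | src/PROBLEMA2.py | encontrar_lineas_1d
-- ===== SOURCE A (Python) =====
-- def encontrar_lineas_1d(arr):
--     '''
--     Analiza un array unidimensional (como una fila o columna de pixeles)
--     para encontrar donde hay segmentos de pixeles
--     y determinar el centro exacto de cada uno.
--     '''
--     # guardamos los puntos centrales en una lista
--     centros = []
--     en_linea = False
--     inicio = 0
--     # iniciamos un bucle donde analizamos cada elemento del array,
--     for i, val in enumerate(arr):
--         # verifica si hay un pixel y si no estamos en una linea, detectando el inicio de un segmento
--         if val and not en_linea: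
--             en_linea = True
--             inicio = i
--         # detectamos el final del segmento
--         elif not val and en_linea:
--             en_linea = False
--             # calcula el punto emdio del inicio y el final y agrega a la lista de centros
--             centros.append((inicio + i) // 2)
--     # si el valor sigue siendo True, significa que la ultima linea llegaba hasta el final
--     if en_linea:
--         centros.append((inicio + len(arr)) // 2)
--     return centros
-- ===== SOURCE B (Python) =====
-- def encontrar_lineas_1d(arr):
--     '''Segment centers via index-block decomposition: collect the indices of
--     truthy entries, then split them into maximal contiguous blocks.'''
--     idx = [i for i, v in enumerate(arr) if v]
--     if not idx:
--         return []
--     centros = []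
--     start = idx[0]
--     prev = idx[0]
--     for i in idx[1:]:
--         if i != prev + 1:
--             centros.append((start + prev + 1) // 2)
--             start = i
--         prev = i
--     centros.append((start + prev + 1) // 2)
--     return centros
-- ===== Notes on version B (the rewrite author's own statement) =====
-- stated objective: alternative
-- what changed: Replaces the edge-triggered boolean-flag state machine with a group-then-map decomposition: collect the indices of truthy entries, split them into maximal contiguous blocks, and emit (first + last + 1)//2 per block, with no trailing-segment special case.
import Mathlib
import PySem

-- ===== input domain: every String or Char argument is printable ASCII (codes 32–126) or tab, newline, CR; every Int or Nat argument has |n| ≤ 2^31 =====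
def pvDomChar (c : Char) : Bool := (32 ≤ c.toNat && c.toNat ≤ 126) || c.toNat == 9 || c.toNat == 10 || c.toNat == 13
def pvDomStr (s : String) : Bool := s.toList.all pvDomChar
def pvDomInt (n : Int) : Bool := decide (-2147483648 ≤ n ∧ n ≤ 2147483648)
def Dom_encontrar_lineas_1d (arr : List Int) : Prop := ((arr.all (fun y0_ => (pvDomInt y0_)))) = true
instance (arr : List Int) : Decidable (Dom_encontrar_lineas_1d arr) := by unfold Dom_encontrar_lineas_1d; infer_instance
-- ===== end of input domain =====

-- B replaces A's edge-triggered boolean-flag state machine by a group-then-map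
-- decomposition (collect truthy indices, split into contiguous blocks); same cost.


-- ===== PORT A =====
-- loop body of A: state = (centros, en_linea, inicio); p = (i, val)
def aStep (st : List Int × Bool × Int) (p : Int × Int) : List Int × Bool × Int :=
  if p.2 ≠ 0 ∧ st.2.1 = false then (st.1, true, p.1)
  else if p.2 = 0 ∧ st.2.1 = true then
    (st.1 ++ [PySem.Int.floordiv (st.2.2 + p.1) 2], false, st.2.2)
  else st

-- A's trailing `if en_linea: append((inicio + len(arr)) // 2)`
def aFin (st : List Int × Bool × Int) (n : Int) : List Int :=
  if st.2.1 then st.1 ++ [PySem.Int.floordiv (st.2.2 + n) 2] else st.1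

def encontrar_lineas_1d (arr : List Int) : List Int :=
  aFin ((PySem.List.enumerate arr 0).foldl aStep ([], false, 0)) (arr.length : Int)

-- ===== PORT B =====
-- loop body of B: state = (centros, start, prev); i = next truthy index
def bStep (st : List Int × Int × Int) (i : Int) : List Int × Int × Int :=
  if i ≠ st.2.2 + 1 then
    (st.1 ++ [PySem.Int.floordiv (st.2.1 + st.2.2 + 1) 2], i, i)
  else (st.1, st.2.1, i)

-- B's final `centros.append((start + prev + 1) // 2)`
def bFin (st : List Int × Int × Int) : List Int :=
  st.1 ++ [PySem.Int.floordiv (st.2.1 + st.2.2 + 1) 2]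

def encontrar_lineas_1d_alt (arr : List Int) : List Int :=
  let idx := ((PySem.List.enumerate arr 0).filter (fun p => p.2 != 0)).map (·.1)
  match idx with
  | [] => []
  | h :: t => bFin (t.foldl bStep ([], h, h))

-- ===== PRECONDITION & SPEC =====
def Spec_encontrar_lineas_1d (arr : List Int) (out : List Int) : Prop := out = encontrar_lineas_1d_alt arr
instance (arr : List Int) (out : List Int) : Decidable (Spec_encontrar_lineas_1d arr out) := by unfold Spec_encontrar_lineas_1d; infer_instance

-- ===== CLAIM (what is proved, stated in full; the proofs are below) =====
def Claim_equal_encontrar_lineas_1d : Prop := ∀ (arr : List Int), Dom_encontrar_lineas_1d arr → Spec_encontrar_lineas_1d arr (encontrar_lineas_1d arr)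

-- ===== LEMMAS AND PROOFS =====

-- common specification: centers of the remaining suffix, scanning from index i;
-- `none` = not inside a run, `some s` = inside a run that started at index s
def spec : Option Int → Int → List Int → List Int
  | none, _, [] => []
  | some s, i, [] => [PySem.Int.floordiv (s + i) 2]
  | none, i, v :: t => if v ≠ 0 then spec (some i) (i + 1) t else spec none (i + 1) t
  | some s, i, v :: t =>
    if v ≠ 0 then spec (some s) (i + 1) t
    else PySem.Int.floordiv (s + i) 2 :: spec none (i + 1) t

-- the truthy indices of t, enumerated from i (B's `idx` on a suffix)
def idxFrom (i : Int) (t : List Int) : List Int :=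
  ((PySem.List.enumerate t i).filter (fun p => p.2 != 0)).map (·.1)

-- recursion form of B's loop
def bRec : Int → Int → List Int → List Int
  | s, p, [] => [PySem.Int.floordiv (s + p + 1) 2]
  | s, p, i :: r =>
    if i ≠ p + 1 then PySem.Int.floordiv (s + p + 1) 2 :: bRec i i r
    else bRec s i r

-- B's top level as a function of the index list
def bTop : List Int → List Int
  | [] => []
  | h :: r => bRec h h r

theorem idxFrom_nil (i : Int) : idxFrom i [] = [] := rfl

theorem idxFrom_cons (i v : Int) (t : List Int) :
    idxFrom i (v :: t) =
      if v ≠ 0 then i :: idxFrom (i + 1) t else idxFrom (i + 1) t := by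
  simp only [idxFrom, PySem.List.enumerate_cons, List.filter_cons]
  by_cases hv : v = 0 <;> simp [hv]

theorem le_of_mem_idxFrom (t : List Int) :
    ∀ (i x : Int), x ∈ idxFrom i t → i ≤ x := by
  induction t with
  | nil => intro i x h; simp [idxFrom_nil] at h
  | cons v t ih =>
    intro i x h
    rw [idxFrom_cons] at h
    by_cases hv : v = 0
    · simp [hv] at h
      have := ih (i + 1) x h; omega
    · simp [hv] at h
      rcases h with h | h
      · omega
      · have := ih (i + 1) x h; omega

-- A's loop + trailing append, from any state, equals `spec`
theorem LA (t : List Int) :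
    ∀ (i : Int) (cs : List Int) (b : Bool) (s : Int),
      aFin ((PySem.List.enumerate t i).foldl aStep (cs, b, s)) (i + (t.length : Int))
        = cs ++ spec (if b then some s else none) i t := by
  induction t with
  | nil =>
    intro i cs b s
    cases b <;> simp [PySem.List.enumerate_nil, aFin, spec]
  | cons v t ih =>
    intro i cs b s
    have hn : i + ((v :: t).length : Int) = (i + 1) + (t.length : Int) := by
      simp; ring
    rw [hn, PySem.List.enumerate_cons, List.foldl_cons]
    cases b with
    | false =>
      by_cases hv : v = 0
      · rw [show aStep (cs, false, s) (i, v) = (cs, false, s) from by simp [aStep, hv],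
           ih (i + 1) cs false s]
        simp [spec, hv]
      · rw [show aStep (cs, false, s) (i, v) = (cs, true, i) from by simp [aStep, hv],
           ih (i + 1) cs true i]
        simp [spec, hv]
    | true =>
      by_cases hv : v = 0
      · rw [show aStep (cs, true, s) (i, v)
              = (cs ++ [PySem.Int.floordiv (s + i) 2], false, s) from by simp [aStep, hv],
           ih (i + 1) (cs ++ [PySem.Int.floordiv (s + i) 2]) false s]
        simp [spec, hv]
      · rw [show aStep (cs, true, s) (i, v) = (cs, true, s) from by simp [aStep, hv],
           ih (i + 1) cs true s]
        simp [spec, hv]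

-- B's loop + trailing append, from any state, equals `bRec`
theorem LB (l : List Int) :
    ∀ (cs : List Int) (s p : Int),
      bFin (l.foldl bStep (cs, s, p)) = cs ++ bRec s p l := by
  induction l with
  | nil => intro cs s p; simp [bFin, bRec]
  | cons i r ih =>
    intro cs s p
    rw [List.foldl_cons]
    by_cases h : i = p + 1
    · rw [show bStep (cs, s, p) i = (cs, s, i) from by simp [bStep, h],
         ih cs s i]
      simp [bRec, h]
    · rw [show bStep (cs, s, p) i
            = (cs ++ [PySem.Int.floordiv (s + p + 1) 2], i, i) from by simp [bStep, h],
         ih (cs ++ [PySem.Int.floordiv (s + p + 1) 2]) i i]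
      simp [bRec, h]

-- the common spec equals B's recursion over the truthy-index blocks
theorem FG (t : List Int) :
    ∀ (i : Int),
      spec none i t = bTop (idxFrom i t) ∧
      (∀ s : Int, spec (some s) i t = bRec s (i - 1) (idxFrom i t)) := by
  induction t with
  | nil =>
    intro i
    refine ⟨by simp [idxFrom_nil, spec, bTop], ?_⟩
    intro s
    simp only [idxFrom_nil, spec, bRec]
    have h : s + (i - 1) + 1 = s + i := by ring
    rw [h]
  | cons v t ih =>
    intro i
    by_cases hv : v = 0
    · have hix : idxFrom i (v :: t) = idxFrom (i + 1) t := by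
        rw [idxFrom_cons]; simp [hv]
      constructor
      · rw [hix, show spec none i (v :: t) = spec none (i + 1) t from by simp [spec, hv]]
        exact (ih (i + 1)).1
      · intro s
        rw [hix, show spec (some s) i (v :: t)
              = PySem.Int.floordiv (s + i) 2 :: spec none (i + 1) t from by simp [spec, hv]]
        have h1 := (ih (i + 1)).1
        rcases hr : idxFrom (i + 1) t with _ | ⟨h, r⟩
        · rw [hr] at h1
          simp only [bTop] at h1
          rw [h1, bRec, show s + (i - 1) + 1 = s + i from by ring]
        · have hle : i + 1 ≤ h :=
            le_of_mem_idxFrom t (i + 1) h (by rw [hr]; exact List.mem_cons_self)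
          rw [hr] at h1
          simp only [bTop] at h1
          rw [h1]
          show _ = bRec s (i - 1) (h :: r)
          simp only [bRec]
          rw [if_pos (by omega : h ≠ i - 1 + 1),
              show s + (i - 1) + 1 = s + i from by ring]
    · have hix : idxFrom i (v :: t) = i :: idxFrom (i + 1) t := by
        rw [idxFrom_cons]; simp [hv]
      have h2 := (ih (i + 1)).2
      constructor
      · rw [hix, show spec none i (v :: t) = spec (some i) (i + 1) t from by simp [spec, hv],
           h2 i, show i + 1 - 1 = i from by ring]
        simp [bTop]
      · intro s
        rw [hix, show spec (some s) i (v :: t) = spec (some s) (i + 1) t from by simp [spec, hv],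
           h2 s, show i + 1 - 1 = i from by ring]
        simp only [bRec]
        rw [if_neg (by omega : ¬ i ≠ i - 1 + 1)]

-- ===== VERDICT (by name: the statement is the Claim_ definition above) =====
theorem encontrar_lineas_1d_spec : Claim_equal_encontrar_lineas_1d := by
  intro arr _
  unfold Spec_encontrar_lineas_1d
  show encontrar_lineas_1d arr = encontrar_lineas_1d_alt arr
  unfold encontrar_lineas_1d encontrar_lineas_1d_alt
  have ha := LA arr 0 [] false 0
  simp only [zero_add, List.nil_append, Bool.false_eq_true, if_false] at ha
  rw [ha]
  have hfg := (FG arr 0).1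
  have hidx : ((PySem.List.enumerate arr 0).filter (fun p => p.2 != 0)).map (·.1)
      = idxFrom 0 arr := rfl
  rw [hfg, hidx]
  rcases hr : idxFrom 0 arr with _ | ⟨h, t⟩
  · simp [bTop]
  · simp only [bTop]
    rw [LB t [] h h]
    simp
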